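-- pv_equiv track=rewrite | github.com/Smx2020/Cours_Polytech | Info/td05/main.py | deugueuIse
-- ===== SOURCE A (Python) =====
-- def voyelle(l):
-- 	voy = "eaiouy"
-- 	i = 0
-- 	while i < len(voy):
-- 		if l == voy[i]:
-- 			return(True)
-- 		i += 1
-- 	return(False)
--
-- def deugueuIse(phrase):
-- 	out = ""
-- 	i = 0
-- 	while i < len(phrase):
-- 		if phrase[i] == "e":
-- 			out = out + phrase[i] + "gu" + phrase[i]
-- 		elif voyelle(phrase[i]) :
-- 			out = out + phrase[i] + "g" + phrase[i]
-- 		else :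
-- 			out = out + phrase[i]
-- 		i += 1
-- 	return(out)
-- ===== SOURCE B (Python) =====
-- def deugueuIse(phrase):
--     # Six staged full-string replace passes; 'u' is done before 'e' so the 'u'
--     # inserted by the 'e' expansion is never itself expanded.
--     for v, exp in (('u', 'ugu'), ('e', 'egue'), ('a', 'aga'),
--                    ('i', 'igi'), ('o', 'ogo'), ('y', 'ygy')):
--         phrase = phrase.replace(v, exp)
--     return phrase
-- ===== Notes on version B (the rewrite author's own statement) =====
-- stated objective: alternative
-- what changed: Replaces the index-driven while loop with a per-character branch and vowel-scan helper by six staged whole-string str.replace passes, one per vowel, ordered ('u' before 'e') so inserted characters are never re-expanded.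
import Mathlib
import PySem

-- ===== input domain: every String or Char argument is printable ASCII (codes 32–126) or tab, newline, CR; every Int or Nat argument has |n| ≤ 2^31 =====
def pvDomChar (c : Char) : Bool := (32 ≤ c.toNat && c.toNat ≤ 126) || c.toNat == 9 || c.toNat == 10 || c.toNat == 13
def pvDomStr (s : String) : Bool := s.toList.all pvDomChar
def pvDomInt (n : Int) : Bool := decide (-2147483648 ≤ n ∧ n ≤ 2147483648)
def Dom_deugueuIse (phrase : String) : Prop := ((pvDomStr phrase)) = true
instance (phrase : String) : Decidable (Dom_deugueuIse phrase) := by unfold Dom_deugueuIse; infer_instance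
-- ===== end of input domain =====

-- B replaces A's per-character while loop (with its vowel-scan helper) by six staged
-- full-string replace passes ('u' staged before 'e' so inserted characters are never
-- re-expanded) — an alternative algorithm of similar cost.


-- ===== PORT A =====
-- helper voyelle: while loop over the string "eaiouy" by index
def voyelleLoop (voy : List Char) (l : Char) (i : Nat) : Bool :=
  if h : i < voy.length then
    if l = voy[i] then true
    else voyelleLoop voy l (i + 1)
  else false
termination_by voy.length - i

def voyelle (l : Char) : Bool := voyelleLoop ['e', 'a', 'i', 'o', 'u', 'y'] l 0

-- while loop of deugueuIse: index i, accumulator out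
def deugueuIseLoop (cs : List Char) (out : List Char) (i : Nat) : List Char :=
  if h : i < cs.length then
    if cs[i] = 'e' then
      deugueuIseLoop cs (out ++ [cs[i]] ++ ['g', 'u'] ++ [cs[i]]) (i + 1)
    else if voyelle cs[i] then
      deugueuIseLoop cs (out ++ [cs[i]] ++ ['g'] ++ [cs[i]]) (i + 1)
    else
      deugueuIseLoop cs (out ++ [cs[i]]) (i + 1)
  else out
termination_by cs.length - i

def deugueuIse (phrase : String) : String :=
  String.ofList (deugueuIseLoop phrase.toList [] 0)

-- ===== PORT B =====
-- the six staged (vowel, expansion) replace passes, in Source B's order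
def pvStages : List (String × String) :=
  [("u", "ugu"), ("e", "egue"), ("a", "aga"), ("i", "igi"), ("o", "ogo"), ("y", "ygy")]

def deugueuIse_alt (phrase : String) : String :=
  pvStages.foldl (fun p ve => PySem.Str.replace p ve.1 ve.2) phrase

-- ===== PRECONDITION & SPEC =====
def Spec_deugueuIse (phrase : String) (out : String) : Prop := out = deugueuIse_alt phrase
instance (phrase : String) (out : String) : Decidable (Spec_deugueuIse phrase out) := by unfold Spec_deugueuIse; infer_instance

-- ===== CLAIM (what is proved, stated in full; the proofs are below) =====
def Claim_equal_deugueuIse : Prop := ∀ (phrase : String), Dom_deugueuIse phrase → Spec_deugueuIse phrase (deugueuIse phrase)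

-- ===== LEMMAS AND PROOFS =====

-- one-character expansion, as A's branch performs it
def pvExpand (c : Char) : List Char :=
  if c = 'e' then [c, 'g', 'u', c]
  else if voyelle c then [c, 'g', c]
  else [c]

-- replacing a single-character pattern is a per-character flatMap
def pvRep (v : Char) (e : List Char) (l : List Char) : List Char :=
  l.flatMap (fun c => if c = v then e else [c])

lemma voyelle_eq (c : Char) :
    voyelle c = (c == 'e' || c == 'a' || c == 'i' || c == 'o' || c == 'u' || c == 'y') := by
  unfold voyelle
  rw [voyelleLoop, voyelleLoop, voyelleLoop, voyelleLoop, voyelleLoop,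
      voyelleLoop, voyelleLoop]
  simp only [List.length_cons, List.length_nil,
             show (0:Nat) < 6 by norm_num, show (1:Nat) < 6 by norm_num,
             show (2:Nat) < 6 by norm_num, show (3:Nat) < 6 by norm_num,
             show (4:Nat) < 6 by norm_num, show (5:Nat) < 6 by norm_num]
  norm_num [beq_iff_eq]
  simp [Bool.or_assoc, Bool.beq_eq_decide_eq]

-- A's loop invariant: from index i the loop appends the expansions of the suffix
lemma loop_eq (cs : List Char) (out : List Char) (i : Nat) :
    deugueuIseLoop cs out i = out ++ (cs.drop i).flatMap pvExpand := by
  by_cases h : i < cs.length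
  · have hdrop : cs.drop i = cs[i] :: cs.drop (i + 1) := List.drop_eq_getElem_cons h
    rw [deugueuIseLoop]
    simp only [dif_pos h]
    split_ifs with h1 h2
    · rw [loop_eq]; conv_rhs => rw [hdrop, List.flatMap_cons]
      simp [pvExpand, h1, List.append_assoc]
    · rw [loop_eq]; conv_rhs => rw [hdrop, List.flatMap_cons]
      simp [pvExpand, h1, h2, List.append_assoc]
    · rw [loop_eq]; conv_rhs => rw [hdrop, List.flatMap_cons]
      simp [pvExpand, h1, h2, List.append_assoc]
  · rw [deugueuIseLoop]
    simp [h, List.drop_eq_nil_of_le (Nat.le_of_not_lt h)]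
termination_by cs.length - i

-- the fueled replace.go on a single-character pattern
lemma replace_go_single (v : Char) (e : List Char) (l acc : List Char) (fuel : Nat)
    (hf : l.length ≤ fuel) :
    PySem.Chars.replace.go [v] e fuel l acc = acc.reverse ++ pvRep v e l := by
  induction l generalizing acc fuel with
  | nil =>
      cases fuel <;> simp [PySem.Chars.replace.go, pvRep]
  | cons c t ih =>
      cases fuel with
      | zero => simp at hf
      | succ f =>
          rw [PySem.Chars.replace.go]
          by_cases hc : c = v
          · have hp : List.isPrefixOf [v] (c :: t) = true := by
              simp [List.isPrefixOf, hc]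
            rw [if_pos hp]
            have := ih (acc := e.reverse ++ acc) (fuel := f)
              (by simpa using Nat.le_of_succ_le_succ hf)
            simpa [pvRep, hc, List.append_assoc] using this
          · have hp : List.isPrefixOf [v] (c :: t) = false := by
              simp [List.isPrefixOf]; exact fun h => absurd h.symm hc
            rw [if_neg (by simp [hp])]
            have := ih (acc := c :: acc) (fuel := f)
              (Nat.le_of_succ_le_succ hf)
            simpa [pvRep, hc, List.append_assoc] using this

lemma replace_single (v : Char) (e : List Char) (l : List Char) :
    PySem.Chars.replace l [v] e = pvRep v e l := by
  unfold PySem.Chars.replace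
  rw [if_neg (by simp)]
  simpa using replace_go_single v e l [] l.length le_rfl

-- pvRep distributes over a flatMap
lemma pvRep_flatMap (v : Char) (e : List Char) (f : Char → List Char) (l : List Char) :
    pvRep v e (l.flatMap f) = l.flatMap (fun c => pvRep v e (f c)) := by
  simp [pvRep, List.flatMap_assoc]

-- the six staged passes on a single character equal A's one-character expansion
lemma stages_single (c : Char) :
    pvRep 'y' "ygy".toList (pvRep 'o' "ogo".toList (pvRep 'i' "igi".toList
      (pvRep 'a' "aga".toList (pvRep 'e' "egue".toList (pvRep 'u' "ugu".toList [c])))))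
      = pvExpand c := by
  by_cases hu : c = 'u'
  · subst hu; simp [pvRep, pvExpand, voyelle_eq]
  · by_cases he : c = 'e'
    · subst he; simp [pvRep, pvExpand]
    · by_cases ha : c = 'a'
      · subst ha; simp [pvRep, pvExpand, voyelle_eq]
      · by_cases hi : c = 'i'
        · subst hi; simp [pvRep, pvExpand, voyelle_eq]
        · by_cases ho : c = 'o'
          · subst ho; simp [pvRep, pvExpand, voyelle_eq]
          · by_cases hy : c = 'y'
            · subst hy; simp [pvRep, pvExpand, voyelle_eq]
            · have hv : voyelle c = false := by
                rw [voyelle_eq]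
                simp [he, ha, hi, ho, hu, hy]
              simp [pvRep, pvExpand, he, ha, hi, ho, hu, hy, hv]

lemma alt_toList (phrase : String) :
    (deugueuIse_alt phrase).toList = phrase.toList.flatMap pvExpand := by
  unfold deugueuIse_alt pvStages
  simp only [List.foldl_cons, List.foldl_nil, PySem.Str.toList_replace]
  simp only [show ("u":String).toList = ['u'] from rfl, show ("e":String).toList = ['e'] from rfl,
             show ("a":String).toList = ['a'] from rfl, show ("i":String).toList = ['i'] from rfl,
             show ("o":String).toList = ['o'] from rfl, show ("y":String).toList = ['y'] from rfl]
  rw [replace_single, replace_single, replace_single, replace_single,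
      replace_single, replace_single]
  have hbase : pvRep 'u' "ugu".toList phrase.toList
      = phrase.toList.flatMap (fun c => pvRep 'u' "ugu".toList [c]) := by
    simp [pvRep]
  rw [hbase, pvRep_flatMap, pvRep_flatMap, pvRep_flatMap, pvRep_flatMap, pvRep_flatMap]
  exact List.flatMap_congr (fun c _ => stages_single c)

-- ===== VERDICT (by name: the statement is the Claim_ definition above) =====
theorem deugueuIse_spec : Claim_equal_deugueuIse := by
  intro phrase _
  unfold Spec_deugueuIse deugueuIse
  rw [loop_eq]
  apply String.toList_injective
  rw [alt_toList]
  simp
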